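-- pv_equiv track=rewrite | github.com/EafenQAQ/srt2ass_guiTool | srt2ass_gui.py | clean_styles_text
-- ===== SOURCE A (Python) =====
-- def clean_styles_text(styles_text):
--     """清理样式文本，移除重复的 Script Info 部分，只保留样式定义"""
--     lines = styles_text.split('\n')
--     cleaned_lines = []
--     in_styles_section = False
--     skip_script_info = False
--
--     for line in lines:
--         stripped_line = line.strip()
--
--         # 跳过重复的 Script Info 部分
--         if stripped_line.startswith('[Script Info]'):
--             skip_script_info = True
--             continue
--         elif stripped_line.startswith('[V4+ Styles]'):
--             in_styles_section = True
--             skip_script_info = False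
--             cleaned_lines.append(line)
--         elif stripped_line.startswith('[') and not stripped_line.startswith('[V4+ Styles]'):
--             in_styles_section = False
--             skip_script_info = False
--             cleaned_lines.append(line)
--         elif not skip_script_info and (in_styles_section or stripped_line.startswith('Style:') or stripped_line.startswith('Format:')):
--             cleaned_lines.append(line)
--         elif not skip_script_info and not in_styles_section:
--             cleaned_lines.append(line)
--
--     return '\n'.join(cleaned_lines)
-- ===== SOURCE B (Python) =====
-- def clean_styles_text(styles_text):
--     """清理样式文本，移除重复的 Script Info 部分，只保留样式定义"""
--     lines = styles_text.split('\n')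
--     # group into a leading chunk plus sections, each section starting at a '['-line
--     sections = [[]]
--     for line in lines:
--         if line.strip().startswith('['):
--             sections.append([line])
--         else:
--             sections[-1].append(line)
--     # keep the leading chunk and every section not headed by [Script Info]
--     kept = sections[0]
--     for sec in sections[1:]:
--         if not sec[0].strip().startswith('[Script Info]'):
--             kept.extend(sec)
--     return '\n'.join(kept)
-- ===== Notes on version B (the rewrite author's own statement) =====
-- stated objective: alternative
-- what changed: Replaced the per-line skip/in-section flag machine with a two-phase pass: group the lines into a leading chunk plus bracket-headed sections, then keep every section except those headed by a Script Info header.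
import Mathlib
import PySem

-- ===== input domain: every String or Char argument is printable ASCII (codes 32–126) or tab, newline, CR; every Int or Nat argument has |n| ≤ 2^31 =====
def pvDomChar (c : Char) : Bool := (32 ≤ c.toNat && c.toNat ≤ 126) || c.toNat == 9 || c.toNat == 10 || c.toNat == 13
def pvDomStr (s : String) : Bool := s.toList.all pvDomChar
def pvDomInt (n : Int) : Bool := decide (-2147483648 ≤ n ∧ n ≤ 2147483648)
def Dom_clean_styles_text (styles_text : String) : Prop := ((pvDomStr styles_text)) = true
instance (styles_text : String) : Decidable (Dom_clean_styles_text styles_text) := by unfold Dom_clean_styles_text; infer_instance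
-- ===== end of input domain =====

-- B replaces A's per-line skip/in-section flag machine with a group-sections-then-filter two-phase pass (alternative decomposition, same cost).

-- ===== PORT A =====
-- s.split('\n') with the nonempty literal separator: split? is always some here, getD [] is never taken
def clean_styles_text (styles_text : String) : String :=
  let lines := (PySem.Str.split? styles_text "\n").getD []
  let st := lines.foldl (fun (st : List String × Bool × Bool) line =>
      let cleaned := st.1
      let in_styles_section := st.2.1
      let skip_script_info := st.2.2
      let stripped := PySem.Str.strip line
      if PySem.Str.startswith stripped "[Script Info]" then
        (cleaned, in_styles_section, true)
      else if PySem.Str.startswith stripped "[V4+ Styles]" then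
        (cleaned ++ [line], true, false)
      else if PySem.Str.startswith stripped "[" && ! PySem.Str.startswith stripped "[V4+ Styles]" then
        (cleaned ++ [line], false, false)
      else if ! skip_script_info && (in_styles_section || PySem.Str.startswith stripped "Style:" || PySem.Str.startswith stripped "Format:") then
        (cleaned ++ [line], in_styles_section, skip_script_info)
      else if ! skip_script_info && ! in_styles_section then
        (cleaned ++ [line], in_styles_section, skip_script_info)
      else st) ([], false, false)
  PySem.Str.join "\n" st.1

-- ===== PORT B =====
def clean_styles_text_alt (styles_text : String) : String :=
  let lines := (PySem.Str.split? styles_text "\n").getD []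
  let sections := lines.foldl (fun (sections : List (List String)) line =>
      if PySem.Str.startswith (PySem.Str.strip line) "[" then
        sections ++ [[line]]
      else
        sections.dropLast ++ [sections.getLastD [] ++ [line]]) [[]]
  let kept := (sections.drop 1).foldl (fun kept sec =>
      if ! PySem.Str.startswith (PySem.Str.strip (sec.headD "")) "[Script Info]" then
        kept ++ sec
      else kept) (sections.headD [])
  PySem.Str.join "\n" kept

-- ===== PRECONDITION & SPEC =====
def Spec_clean_styles_text (styles_text : String) (out : String) : Prop := out = clean_styles_text_alt styles_text
instance (styles_text : String) (out : String) : Decidable (Spec_clean_styles_text styles_text out) := by unfold Spec_clean_styles_text; infer_instance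

-- ===== CLAIM (what is proved, stated in full; the proofs are below) =====
def Claim_equal_clean_styles_text : Prop := ∀ (styles_text : String), Dom_clean_styles_text styles_text → Spec_clean_styles_text styles_text (clean_styles_text styles_text)

-- ===== LEMMAS AND PROOFS =====

-- mid-level characterisation of A's kept lines: only the skip flag matters
def pvKeep : List String → Bool → List String
  | [], _ => []
  | l :: ls, s =>
    if PySem.Str.startswith (PySem.Str.strip l) "[Script Info]" then pvKeep ls true
    else if PySem.Str.startswith (PySem.Str.strip l) "[" then l :: pvKeep ls false
    else if s then pvKeep ls true else l :: pvKeep ls false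

-- backward grouping: (leading chunk, sections each headed by a '['-line)
def pvGroup : List String → List String × List (List String)
  | [] => ([], [])
  | l :: ls =>
    let r := pvGroup ls
    if PySem.Str.startswith (PySem.Str.strip l) "[" then ([], (l :: r.1) :: r.2)
    else (l :: r.1, r.2)

def pvFlatFilt : List (List String) → List String
  | [] => []
  | sec :: secs =>
    if PySem.Str.startswith (PySem.Str.strip (sec.headD "")) "[Script Info]" then pvFlatFilt secs
    else sec ++ pvFlatFilt secs

theorem pvBr_of_prefix (s p : List Char) (h : PySem.Chars.startswith s ('[' :: p) = true) :
    PySem.Chars.startswith s ['['] = true := by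
  rcases (PySem.Chars.startswith_iff s ('[' :: p)).mp h with ⟨t, ht⟩
  exact (PySem.Chars.startswith_iff s ['[']).mpr ⟨p ++ t, by simpa using ht⟩

theorem pvA_fold (ls : List String) : ∀ (acc : List String) (inS s : Bool),
    (ls.foldl (fun (st : List String × Bool × Bool) line =>
      let cleaned := st.1
      let in_styles_section := st.2.1
      let skip_script_info := st.2.2
      let stripped := PySem.Str.strip line
      if PySem.Str.startswith stripped "[Script Info]" then
        (cleaned, in_styles_section, true)
      else if PySem.Str.startswith stripped "[V4+ Styles]" then
        (cleaned ++ [line], true, false)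
      else if PySem.Str.startswith stripped "[" && ! PySem.Str.startswith stripped "[V4+ Styles]" then
        (cleaned ++ [line], false, false)
      else if ! skip_script_info && (in_styles_section || PySem.Str.startswith stripped "Style:" || PySem.Str.startswith stripped "Format:") then
        (cleaned ++ [line], in_styles_section, skip_script_info)
      else if ! skip_script_info && ! in_styles_section then
        (cleaned ++ [line], in_styles_section, skip_script_info)
      else st) (acc, inS, s)).1 = acc ++ pvKeep ls s := by
  induction ls with
  | nil => intro acc inS s; simp [pvKeep]
  | cons l ls ih =>
    intro acc inS s
    by_cases hsi : PySem.Str.startswith (PySem.Str.strip l) "[Script Info]" = true <;> simp at hsi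
    · simpa [List.foldl, hsi, pvKeep] using ih acc inS true
    · by_cases hv : PySem.Str.startswith (PySem.Str.strip l) "[V4+ Styles]" = true <;> simp at hv
      · have hbr : PySem.Chars.startswith (PySem.Chars.strip l.toList) ['['] = true :=
          pvBr_of_prefix _ _ hv
        simpa [List.foldl, hsi, hv, hbr, pvKeep] using ih (acc ++ [l]) true false
      · by_cases hbr : PySem.Str.startswith (PySem.Str.strip l) "[" = true <;> simp at hbr
        · simpa [List.foldl, hsi, hv, hbr, pvKeep] using ih (acc ++ [l]) false false
        · cases s with
          | true => simpa [List.foldl, hsi, hv, hbr, pvKeep] using ih acc inS true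
          | false =>
            cases inS with
            | true => simpa [List.foldl, hsi, hv, hbr, pvKeep] using ih (acc ++ [l]) true false
            | false =>
              by_cases hst : (PySem.Str.startswith (PySem.Str.strip l) "Style:" || PySem.Str.startswith (PySem.Str.strip l) "Format:") = true <;> simp at hst
              · simpa [List.foldl, hsi, hv, hbr, pvKeep] using ih (acc ++ [l]) false false
              · simpa [List.foldl, hsi, hv, hbr, hst, pvKeep] using ih (acc ++ [l]) false false

theorem pvB_group (ls : List String) : ∀ (S : List (List String)) (c : List String),
    (ls.foldl (fun (sections : List (List String)) line =>
      if PySem.Str.startswith (PySem.Str.strip line) "[" then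
        sections ++ [[line]]
      else
        sections.dropLast ++ [sections.getLastD [] ++ [line]]) (S ++ [c]))
      = (S ++ [c ++ (pvGroup ls).1]) ++ (pvGroup ls).2 := by
  induction ls with
  | nil => intro S c; simp [pvGroup]
  | cons l ls ih =>
    intro S c
    by_cases hbr : PySem.Str.startswith (PySem.Str.strip l) "[" = true <;> simp at hbr
    · simpa [List.foldl, hbr, pvGroup, List.append_assoc] using ih (S ++ [c]) [l]
    · simpa [List.foldl, hbr, pvGroup, List.append_assoc] using ih S (c ++ [l])

theorem pvB_filt (secs : List (List String)) : ∀ (acc : List String),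
    (secs.foldl (fun kept sec =>
      if ! PySem.Str.startswith (PySem.Str.strip (sec.headD "")) "[Script Info]" then
        kept ++ sec
      else kept) acc) = acc ++ pvFlatFilt secs := by
  induction secs with
  | nil => intro acc; simp [pvFlatFilt]
  | cons sec secs ih =>
    intro acc
    by_cases h : PySem.Str.startswith (PySem.Str.strip (sec.headD "")) "[Script Info]" = true <;> simp at h
    · simpa [List.foldl, h, pvFlatFilt] using ih acc
    · simpa [List.foldl, h, pvFlatFilt, List.append_assoc] using ih (acc ++ sec)

theorem pvKeep_group (ls : List String) :
    pvKeep ls false = (pvGroup ls).1 ++ pvFlatFilt (pvGroup ls).2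
    ∧ pvKeep ls true = pvFlatFilt (pvGroup ls).2 := by
  induction ls with
  | nil => simp [pvKeep, pvGroup, pvFlatFilt]
  | cons l ls ih =>
    by_cases hsi : PySem.Str.startswith (PySem.Str.strip l) "[Script Info]" = true <;> simp at hsi
    · have hbr : PySem.Chars.startswith (PySem.Chars.strip l.toList) ['['] = true :=
        pvBr_of_prefix _ _ hsi
      simp [pvKeep, pvGroup, pvFlatFilt, hsi, hbr, ih.2]
    · by_cases hbr : PySem.Str.startswith (PySem.Str.strip l) "[" = true <;> simp at hbr
      · simp [pvKeep, pvGroup, pvFlatFilt, hsi, hbr, ih.1]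
      · simp [pvKeep, pvGroup, hsi, hbr, ih.1, ih.2]

-- ===== VERDICT (by name: the statement is the Claim_ definition above) =====
theorem clean_styles_text_spec : Claim_equal_clean_styles_text := by
  intro styles_text _
  unfold Spec_clean_styles_text
  simp only [clean_styles_text, clean_styles_text_alt]
  have hA := pvA_fold ((PySem.Str.split? styles_text "\n").getD []) [] false false
  have hG := pvB_group ((PySem.Str.split? styles_text "\n").getD []) [] []
  have hK := (pvKeep_group ((PySem.Str.split? styles_text "\n").getD [])).1
  simp only [List.nil_append] at hA hG
  rw [hA, hG]
  simp only [List.singleton_append, List.drop_succ_cons, List.drop_zero, List.headD_cons]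
  rw [pvB_filt, hK]
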